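-- pv_equiv track=rewrite | github.com/spedas/pyspedas | pytplot/MPLPlotter/tplot.py | replace_common_exp
-- ===== SOURCE A (Python) =====
-- def replace_common_exp(title):
--     if hasattr(title, 'decode'):
--         title = title.decode('utf-8')
--     if '$' in title:
--         return title
--     if '^' not in title:
--         return title
--     exp = False
--     title_out = ''
--     for char in title:
--         if char == '^':
--             exp = True
--             title_out += '$^{'
--             continue
--         else:
--             if exp:
--                 if not char.isalnum():
--                     title_out += '}$' + char
--                     exp = False
--                     continue
--         title_out += char
--     if exp:
--         title_out += '}$'
--     return title_out
-- ===== SOURCE B (Python) =====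
-- def _alnum_prefix(seg):
--     for i, ch in enumerate(seg):
--         if not ch.isalnum():
--             return seg[:i], seg[i:]
--     return seg, ''
--
--
-- def replace_common_exp(title):
--     if hasattr(title, 'decode'):
--         title = title.decode('utf-8')
--     if '$' in title:
--         return title
--     if '^' not in title:
--         return title
--     parts = title.split('^')
--     out = [parts[0]]
--     open_group = False
--     for seg in parts[1:]:
--         out.append('$^{')
--         head, tail = _alnum_prefix(seg)
--         if tail:
--             out.append(head + '}$' + tail)
--             open_group = False
--         else:
--             out.append(seg)
--             open_group = True
--     if open_group:
--         out.append('}$')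
--     return ''.join(out)
-- ===== Notes on version B (the rewrite author's own statement) =====
-- stated objective: alternative
-- what changed: Replaced A's per-character state machine (exp flag threaded through every character) by splitting the title on '^' and processing each whole segment at once: its alnum prefix becomes the exponent and the remainder closes the group, with an open-group flag carried only across segments.
import Mathlib
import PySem

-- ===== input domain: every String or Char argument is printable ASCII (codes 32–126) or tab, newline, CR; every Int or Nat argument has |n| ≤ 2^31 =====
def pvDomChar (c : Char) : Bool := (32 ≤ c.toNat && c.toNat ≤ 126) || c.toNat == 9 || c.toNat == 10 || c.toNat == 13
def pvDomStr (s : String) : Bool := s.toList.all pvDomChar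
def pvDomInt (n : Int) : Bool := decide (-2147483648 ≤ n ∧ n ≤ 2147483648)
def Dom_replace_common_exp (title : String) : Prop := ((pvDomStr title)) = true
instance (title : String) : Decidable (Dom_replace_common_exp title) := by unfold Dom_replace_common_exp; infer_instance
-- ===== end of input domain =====

-- B replaces A's character-at-a-time state machine by a split-on-'^' decomposition over whole segments (objective: alternative, same cost).
-- A's Python-2 'decode' branch is dead on str input and is not ported.

-- ===== PORT A =====
-- A's loop body, one character at a time over state (exp, title_out); strings are carried as List Char (the PySem.Chars representation, exact on the ASCII domain).
def replaceCommonExpStepA (st : Bool × List Char) (char : Char) : Bool × List Char :=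
  if char = '^' then (true, st.2 ++ ['$', '^', '{'])
  else if st.1 && !(PySem.Chars.isalnum char) then (false, st.2 ++ ['}', '$', char])
  else (st.1, st.2 ++ [char])

def replace_common_exp (title : String) : String :=
  if PySem.Str.isIn "$" title then title
  else if !(PySem.Str.isIn "^" title) then title
  else
    let r := title.toList.foldl replaceCommonExpStepA (false, [])
    String.ofList (if r.1 then r.2 ++ ['}', '$'] else r.2)

-- ===== PORT B =====
-- Source B's _alnum_prefix: longest leading run of isalnum characters, and the rest.
def alnumPrefix (seg : List Char) : List Char × List Char :=
  match seg with
  | [] => ([], [])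
  | c :: cs =>
    if PySem.Chars.isalnum c then
      let p := alnumPrefix cs
      (c :: p.1, p.2)
    else ([], c :: cs)

-- Source B's loop body over one '^'-separated segment, state (out, open_group).
def replaceCommonExpStepB (st : List Char × Bool) (seg : List Char) : List Char × Bool :=
  let out := st.1 ++ ['$', '^', '{']
  let p := alnumPrefix seg
  if p.2 ≠ [] then (out ++ p.1 ++ ['}', '$'] ++ p.2, false)
  else (out ++ seg, true)

def replace_common_exp_alt (title : String) : String :=
  if PySem.Str.isIn "$" title then title
  else if !(PySem.Str.isIn "^" title) then title
  else
    match PySem.Chars.splitOn title.toList ['^'] with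
    | [] => ""   -- unreachable: split never returns an empty list
    | p0 :: rest =>
      let r := rest.foldl replaceCommonExpStepB (p0, false)
      String.ofList (if r.2 then r.1 ++ ['}', '$'] else r.1)

-- ===== PRECONDITION & SPEC =====
def Spec_replace_common_exp (title : String) (out : String) : Prop := out = replace_common_exp_alt title
instance (title : String) (out : String) : Decidable (Spec_replace_common_exp title out) := by unfold Spec_replace_common_exp; infer_instance

-- ===== CLAIM (what is proved, stated in full; the proofs are below) =====
def Claim_equal_replace_common_exp : Prop := ∀ (title : String), Dom_replace_common_exp title → Spec_replace_common_exp title (replace_common_exp title)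

-- ===== LEMMAS AND PROOFS =====

-- Accumulator-free form of A's loop: final (exp, emitted text).
def aGoP : List Char → Bool → Bool × List Char
  | [], e => (e, [])
  | c :: cs, e =>
    if c = '^' then
      let r := aGoP cs true
      (r.1, '$' :: '^' :: '{' :: r.2)
    else if e && !(PySem.Chars.isalnum c) then
      let r := aGoP cs false
      (r.1, '}' :: '$' :: c :: r.2)
    else
      let r := aGoP cs e
      (r.1, c :: r.2)

-- Accumulator-free form of B's segment loop: final (open_group, emitted text).
def bGoP : List (List Char) → Bool → Bool × List Char
  | [], e => (e, [])
  | s :: rs, _ =>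
    if (alnumPrefix s).2 ≠ [] then
      let r := bGoP rs false
      (r.1, '$' :: '^' :: '{' :: ((alnumPrefix s).1 ++ '}' :: '$' :: ((alnumPrefix s).2 ++ r.2)))
    else
      let r := bGoP rs true
      (r.1, '$' :: '^' :: '{' :: (s ++ r.2))

theorem foldA_eq (cs : List Char) (e : Bool) (out : List Char) :
    cs.foldl replaceCommonExpStepA (e, out) = ((aGoP cs e).1, out ++ (aGoP cs e).2) := by
  induction cs generalizing e out with
  | nil => simp [aGoP]
  | cons c cs ih =>
    simp only [List.foldl_cons, replaceCommonExpStepA, aGoP]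
    split_ifs <;> simp [ih]

theorem foldB_eq (rs : List (List Char)) (e : Bool) (out : List Char) :
    rs.foldl replaceCommonExpStepB (out, e) = (out ++ (bGoP rs e).2, (bGoP rs e).1) := by
  induction rs generalizing e out with
  | nil => simp [bGoP]
  | cons s rs ih =>
    simp only [List.foldl_cons, replaceCommonExpStepB, bGoP]
    split_ifs <;> simp [ih]

theorem aGoP_copy (s cs : List Char) (h : '^' ∉ s) :
    aGoP (s ++ cs) false = ((aGoP cs false).1, s ++ (aGoP cs false).2) := by
  induction s with
  | nil => simp
  | cons c s ih =>
    have hc : c ≠ '^' := fun hh => h (hh ▸ List.mem_cons_self)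
    simp only [List.cons_append, aGoP, if_neg hc, Bool.false_and]
    simp [ih fun hm => h (List.mem_cons_of_mem _ hm)]

theorem aGoP_exp (s cs : List Char) (h : '^' ∉ s) :
    aGoP (s ++ cs) true =
      (if (alnumPrefix s).2 ≠ [] then
        ((aGoP cs false).1, (alnumPrefix s).1 ++ '}' :: '$' :: ((alnumPrefix s).2 ++ (aGoP cs false).2))
       else ((aGoP cs true).1, s ++ (aGoP cs true).2)) := by
  induction s with
  | nil => simp [alnumPrefix]
  | cons c s ih =>
    have hc : c ≠ '^' := fun hh => h (hh ▸ List.mem_cons_self)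
    have hs : '^' ∉ s := fun hm => h (List.mem_cons_of_mem _ hm)
    simp only [List.cons_append, aGoP, if_neg hc, alnumPrefix]
    by_cases ha : PySem.Chars.isalnum c
    · simp only [ha, Bool.not_true, Bool.true_and, if_neg (by simp : ¬ (false = true))]
      rw [ih hs]
      by_cases ht : (alnumPrefix s).2 ≠ [] <;> simp [ht]
    · simp only [ha, Bool.true_and, Bool.not_false]
      simp [aGoP_copy s cs hs]

theorem aGoP_flatMap (rs : List (List Char)) (h : ∀ s ∈ rs, '^' ∉ s) (e : Bool) :
    aGoP (rs.flatMap (fun s => '^' :: s)) e = bGoP rs e := by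
  induction rs generalizing e with
  | nil => rfl
  | cons s rs ih =>
    have hs : '^' ∉ s := h s List.mem_cons_self
    have hrs : ∀ t ∈ rs, '^' ∉ t := fun t ht => h t (List.mem_cons_of_mem _ ht)
    simp only [List.flatMap_cons, List.cons_append, aGoP, bGoP]
    rw [aGoP_exp _ _ hs]
    by_cases ht : (alnumPrefix s).2 ≠ [] <;> simp [ht, ih hrs]

-- PySem's split with the one-character separator '^' is core's List.splitOn.
theorem splitOn_go_eq (fuel : Nat) (l cur : List Char) (acc : List (List Char)) (hf : l.length < fuel) :
    PySem.Chars.splitOn.go ['^'] fuel l cur acc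
      = acc.reverse ++ List.modifyHead (cur.reverse ++ ·) (List.splitOnP (· == '^') l) := by
  induction fuel generalizing l cur acc with
  | zero => omega
  | succ fuel ih =>
    cases l with
    | nil => simp [PySem.Chars.splitOn.go, List.splitOnP_nil]
    | cons c rest =>
      simp only [PySem.Chars.splitOn.go, List.splitOnP_cons]
      by_cases hc : c = '^'
      · have hp : List.isPrefixOf ['^'] (c :: rest) = true := by simp [hc, List.isPrefixOf]
        rw [if_pos hp]
        subst hc
        rw [ih _ _ _ (by simpa using Nat.lt_of_succ_lt_succ hf)]
        obtain ⟨p, ps, hsp⟩ := List.exists_cons_of_ne_nil (List.splitOnP_ne_nil (· == '^') rest)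
        simp [hsp]
      · have hp : List.isPrefixOf ['^'] (c :: rest) = false := by
          simp [List.isPrefixOf]; exact fun hh => hc hh.symm
        rw [if_neg (by simp [hp])]
        rw [ih _ _ _ (by simpa using Nat.lt_of_succ_lt_succ hf)]
        obtain ⟨p, ps, hsp⟩ := List.exists_cons_of_ne_nil (List.splitOnP_ne_nil (· == '^') rest)
        simp [hsp, hc]

theorem pysem_splitOn_caret (cs : List Char) :
    PySem.Chars.splitOn cs ['^'] = List.splitOn '^' cs := by
  unfold PySem.Chars.splitOn
  rw [splitOn_go_eq _ _ _ _ (Nat.lt_succ_self _)]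
  obtain ⟨p, ps, hsp⟩ := List.exists_cons_of_ne_nil (List.splitOnP_ne_nil (· == '^') cs)
  simp [List.splitOn, hsp]

theorem not_mem_splitOnP (cs : List Char) :
    ∀ l ∈ List.splitOnP (· == '^') cs, '^' ∉ l := by
  induction cs with
  | nil => simp [List.splitOnP_nil]
  | cons c cs ih =>
    intro l hl
    rw [List.splitOnP_cons] at hl
    by_cases hc : c = '^'
    · rw [if_pos (by simp [hc])] at hl
      rcases List.mem_cons.mp hl with rfl | hl
      · simp
      · exact ih l hl
    · rw [if_neg (by simp [hc])] at hl
      obtain ⟨p, ps, hsp⟩ := List.exists_cons_of_ne_nil (List.splitOnP_ne_nil (· == '^') cs)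
      rw [hsp, List.modifyHead_cons] at hl
      rcases List.mem_cons.mp hl with rfl | hl
      · intro hm
        rcases List.mem_cons.mp hm with rfl | hm
        · exact hc rfl
        · exact ih p (hsp ▸ List.mem_cons_self) hm
      · exact ih l (hsp ▸ List.mem_cons_of_mem _ hl)

theorem intercalate_caret (p0 : List Char) (rs : List (List Char)) :
    [('^' : Char)].intercalate (p0 :: rs) = p0 ++ rs.flatMap (fun s => '^' :: s) := by
  induction rs generalizing p0 with
  | nil => simp [List.intercalate]
  | cons s rs ih => simp [List.intercalate, List.intersperse] at ih ⊢; simp [ih]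

-- ===== VERDICT (by name: the statement is the Claim_ definition above) =====
theorem replace_common_exp_spec : Claim_equal_replace_common_exp := by
  intro title _
  unfold Spec_replace_common_exp replace_common_exp replace_common_exp_alt
  by_cases h1 : PySem.Chars.isIn ['$'] title.toList = true
  · simp [PySem.Str.isIn_eq, h1]
  · by_cases h2 : PySem.Chars.isIn ['^'] title.toList = true
    · simp only [PySem.Str.isIn_eq]
      obtain ⟨p0, rest, hsp⟩ := List.exists_cons_of_ne_nil
        (List.splitOnP_ne_nil (· == '^') title.toList)
      have hsp' : List.splitOn '^' title.toList = p0 :: rest := hsp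
      have hpieces : ∀ l ∈ p0 :: rest, '^' ∉ l := by
        rw [← hsp']; exact not_mem_splitOnP title.toList
      have hdecomp : title.toList = p0 ++ rest.flatMap (fun s => '^' :: s) := by
        conv_lhs => rw [← List.intercalate_splitOn title.toList '^', hsp']
        exact intercalate_caret p0 rest
      have hflat := aGoP_flatMap rest (fun s hs => hpieces s (List.mem_cons_of_mem _ hs)) false
      conv_lhs => rw [if_neg (by simp [h1]), if_neg (by simp [h2])]
      conv_rhs => rw [if_neg (by simp [h1]), if_neg (by simp [h2]), pysem_splitOn_caret, hsp']
      simp only [foldA_eq, foldB_eq]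
      rw [hdecomp, aGoP_copy _ _ (hpieces p0 List.mem_cons_self), hflat]
      by_cases hfl : (bGoP rest false).1 = true <;> simp [hfl]
    · simp [PySem.Str.isIn_eq, h1, h2]
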